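-- pv_equiv track=rewrite | github.com/tanmayidev/dsa-solutions | freecodecamp/daily-code-challenge/2026-02-21.py | score_curling
-- ===== SOURCE A (Python) =====
-- def score_curling(house):
--     center = (2, 2)
--
--     def ring_distance(r, c):
--         return max(abs(r - center[0]), abs(c - center[1]))
--
--     stones = {"R": [], "Y": []}
--
--     for r in range(5):
--         for c in range(5):
--             if house[r][c] in stones:
--                 stones[house[r][c]].append(ring_distance(r, c))
--
--     if not stones["R"] and not stones["Y"]:
--         return "No points awarded"
--
--     if not stones["R"]:
--         scoring_team = "Y"
--     elif not stones["Y"]: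
--         scoring_team = "R"
--     else:
--         min_r = min(stones["R"])
--         min_y = min(stones["Y"])
--
--         if min_r == min_y:
--             return "No points awarded"
--
--         scoring_team = "R" if min_r < min_y else "Y"
--
--     opponent = "Y" if scoring_team == "R" else "R"
--     opponent_min = min(stones[opponent]) if stones[opponent] else float("inf")
--
--     points = sum(1 for d in stones[scoring_team] if d < opponent_min)
--
--     return f"{scoring_team}: {points}"
-- ===== SOURCE B (Python) =====
-- def score_curling(house):
--     # Scan the house ring by ring from the button outward, stopping as soon as
--     # the opponent's first stone is reached; no per-team distance lists or min().
--     def ring_cells(d):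
--         if d == 0:
--             return [(2, 2)]
--         cells = []
--         for c in range(2 - d, 3 + d):
--             cells.append((2 - d, c))
--             cells.append((2 + d, c))
--         for r in range(3 - d, 2 + d):
--             cells.append((r, 2 - d))
--             cells.append((r, 2 + d))
--         return cells
--
--     state = None  # (team, points) once the scoring team is known
--     for d in range(3):
--         r_here = sum(1 for (r, c) in ring_cells(d) if house[r][c] == "R")
--         y_here = sum(1 for (r, c) in ring_cells(d) if house[r][c] == "Y")
--         if state is None:
--             if r_here and y_here:
--                 return "No points awarded"
--             if r_here:
--                 state = ("R", r_here)
--             elif y_here: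
--                 state = ("Y", y_here)
--         else:
--             team, pts = state
--             opp = y_here if team == "R" else r_here
--             if opp:
--                 return f"{team}: {pts}"
--             own = r_here if team == "R" else y_here
--             state = (team, pts + own)
--     if state is None:
--         return "No points awarded"
--     return f"{state[0]}: {state[1]}"
-- ===== Notes on version B (the rewrite author's own statement) =====
-- stated objective: alternative
-- what changed: B walks the house ring by ring outward from the button (explicit ring-cell enumeration) and stops early at the opponent's first occupied ring, instead of A's full row-major grid pass into per-team distance lists followed by min() and a filtered count.
import Mathlib
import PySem

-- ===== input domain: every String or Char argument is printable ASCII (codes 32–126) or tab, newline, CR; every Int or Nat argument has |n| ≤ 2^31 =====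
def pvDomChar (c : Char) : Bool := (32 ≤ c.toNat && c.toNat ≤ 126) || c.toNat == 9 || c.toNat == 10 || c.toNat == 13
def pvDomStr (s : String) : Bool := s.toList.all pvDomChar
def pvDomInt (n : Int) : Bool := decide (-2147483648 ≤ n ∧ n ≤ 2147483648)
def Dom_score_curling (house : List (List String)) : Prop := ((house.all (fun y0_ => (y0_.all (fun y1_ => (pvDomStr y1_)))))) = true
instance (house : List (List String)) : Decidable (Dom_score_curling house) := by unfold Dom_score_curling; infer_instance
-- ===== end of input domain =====

-- B scans the house ring by ring from the button outward with an early stop at the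
-- opponent's first occupied ring, instead of A's full grid pass into per-team
-- distance lists followed by min() and a filtered count.

-- ===== PORT A =====
-- house[r][c]: both ports read cells through this total accessor; Pre_ guarantees the
-- indices are in range, so the defaults are never hit on admitted inputs.
def cellAt (house : List (List String)) (r c : Int) : String :=
  PySem.List.pyGetD (PySem.List.pyGetD house r []) c ""

def ringDist (r c : Int) : Int := max |r - 2| |c - 2|

-- A's nested-loop body: append ring_distance(r, c) to stones[house[r][c]] when present
def aStep (house : List (List String)) (st : PySem.Dict String (List Int)) (r c : Int) :
    PySem.Dict String (List Int) :=
  if st.contains (cellAt house r c) then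
    st.modify (cellAt house r c) [] (fun l => l ++ [ringDist r c])
  else st

-- A's code after the loop (the early returns become an Option for the scoring team;
-- opponent_min: `none` plays the role of float("inf"), below which every d compares true)
def aFinish (stones : PySem.Dict String (List Int)) : String :=
  if stones.getD "R" [] = [] ∧ stones.getD "Y" [] = [] then "No points awarded"
  else
    let team? : Option String :=
      if stones.getD "R" [] = [] then some "Y"
      else if stones.getD "Y" [] = [] then some "R"
      else
        let minR := (PySem.List.min? (stones.getD "R" []) (fun x => x)).getD 0
        let minY := (PySem.List.min? (stones.getD "Y" []) (fun x => x)).getD 0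
        if minR = minY then none
        else if minR < minY then some "R" else some "Y"
    match team? with
    | none => "No points awarded"
    | some team =>
      let opponent := if team = "R" then "Y" else "R"
      let oppMin? := PySem.List.min? (stones.getD opponent []) (fun x => x)
      let points := (stones.getD team []).foldl
        (fun acc d =>
          if (match oppMin? with | none => true | some m => decide (d < m)) then acc + 1 else acc)
        (0 : Int)
      team ++ ": " ++ PySem.Int.toStr points

def score_curling (house : List (List String)) : String :=
  aFinish ((PySem.List.pyRange 0 5 1).foldl
    (fun st r => (PySem.List.pyRange 0 5 1).foldl (fun st c => aStep house st r c) st)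
    (PySem.Dict.ofList [("R", ([] : List Int)), ("Y", ([] : List Int))]))

-- ===== PORT B =====
-- the cells of ring d, built exactly as Source B's ring_cells loops append them
def ringCells (d : Int) : List (Int × Int) :=
  if d = 0 then [(2, 2)]
  else
    ((PySem.List.pyRange (2 - d) (3 + d) 1).flatMap (fun c => [(2 - d, c), (2 + d, c)]))
    ++ ((PySem.List.pyRange (3 - d) (2 + d) 1).flatMap (fun r => [(r, 2 - d), (r, 2 + d)]))

-- sum(1 for (r, c) in ring_cells(d) if house[r][c] == t)
def ringCount (house : List (List String)) (t : String) (d : Int) : Int :=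
  (ringCells d).foldl (fun acc p => if cellAt house p.1 p.2 = t then acc + 1 else acc) 0

-- the body of Source B's `for d in range(3)` loop; Sum.inl = an early `return`
def scanStep (house : List (List String))
    (s : Sum String (Option (String × Int))) (d : Int) : Sum String (Option (String × Int)) :=
  match s with
  | .inl r => .inl r
  | .inr st =>
    let rHere := ringCount house "R" d
    let yHere := ringCount house "Y" d
    match st with
    | none =>
      if rHere ≠ 0 ∧ yHere ≠ 0 then .inl "No points awarded"
      else if rHere ≠ 0 then .inr (some ("R", rHere))
      else if yHere ≠ 0 then .inr (some ("Y", yHere))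
      else .inr none
    | some (team, pts) =>
      let opp := if team = "R" then yHere else rHere
      if opp ≠ 0 then .inl (team ++ ": " ++ PySem.Int.toStr pts)
      else
        let own := if team = "R" then rHere else yHere
        .inr (some (team, pts + own))

-- Source B's code after the loop: unwrap an early return / no stones / the final f-string
def scanFinish (s : Sum String (Option (String × Int))) : String :=
  match s with
  | .inl r => r
  | .inr none => "No points awarded"
  | .inr (some (team, pts)) => team ++ ": " ++ PySem.Int.toStr pts

def score_curling_alt (house : List (List String)) : String :=
  scanFinish ((PySem.List.pyRange 0 3 1).foldl (scanStep house) (Sum.inr none))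

-- ===== PRECONDITION & SPEC =====
-- A indexes house[r][c] for all r, c in 0..4, so it raises IndexError unless there are at
-- least 5 rows whose first 5 rows each have at least 5 cells; exactly those inputs are admitted.
def Pre_score_curling (house : List (List String)) : Prop :=
  5 ≤ house.length ∧ ∀ row ∈ house.take 5, 5 ≤ row.length

instance (house : List (List String)) : Decidable (Pre_score_curling house) := by
  unfold Pre_score_curling; infer_instance

def pvWitness_score_curling : List (List String) :=
  [["R", ".", ".", ".", "."],
   [".", ".", "Y", ".", "."],
   [".", ".", ".", ".", "."],
   [".", "Y", ".", ".", "."],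
   [".", ".", ".", ".", "R"]]

def Spec_score_curling (house : List (List String)) (out : String) : Prop :=
  out = score_curling_alt house

instance (house : List (List String)) (out : String) : Decidable (Spec_score_curling house out) := by
  unfold Spec_score_curling; infer_instance

-- ===== CLAIM =====
def Claim_equal_score_curling : Prop :=
  ∀ (house : List (List String)), Dom_score_curling house → Pre_score_curling house →
    Spec_score_curling house (score_curling house)

-- ===== LEMMAS AND PROOFS =====
-- the 25 cells A visits, in traversal order
def pvPairs : List (Int × Int) :=
  (PySem.List.pyRange 0 5 1).flatMap (fun r => (PySem.List.pyRange 0 5 1).map (fun c => (r, c)))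

-- the distances A appends for team t over a pair list, in order
def pvProj (house : List (List String)) (t : String) (ps : List (Int × Int)) : List Int :=
  (ps.filter (fun p => cellAt house p.1 p.2 == t)).map (fun p => ringDist p.1 p.2)

-- the closed scoring form both sides are reduced to: six ring counts in, the answer out
def nr3 (x0 x1 x2 : Int) : Int :=
  if x0 ≠ 0 then 0 else if x1 ≠ 0 then 1 else if x2 ≠ 0 then 2 else 3

def bucketOut (a0 a1 a2 b0 b1 b2 : Int) : String :=
  let nR := nr3 a0 a1 a2
  let nY := nr3 b0 b1 b2
  if nR = nY then "No points awarded"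
  else if nR < nY then
    "R" ++ ": " ++ PySem.Int.toStr (if nY = 1 then a0 else if nY = 2 then a0 + a1 else a0 + a1 + a2)
  else
    "Y" ++ ": " ++ PySem.Int.toStr (if nR = 1 then b0 else if nR = 2 then b0 + b1 else b0 + b1 + b2)

lemma pvPairs_bound : ∀ p ∈ pvPairs, 0 ≤ ringDist p.1 p.2 ∧ ringDist p.1 p.2 < 3 := by decide

lemma nested_eq_flat (f : PySem.Dict String (List Int) → Int → Int → PySem.Dict String (List Int))
    (init : PySem.Dict String (List Int)) :
    (PySem.List.pyRange 0 5 1).foldl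
      (fun s r => (PySem.List.pyRange 0 5 1).foldl (fun s c => f s r c) s) init
    = pvPairs.foldl (fun s p => f s p.1 p.2) init := by
  rw [show PySem.List.pyRange 0 5 1 = [0,1,2,3,4] from by decide,
      show pvPairs = [0,1,2,3,4].flatMap (fun r => [0,1,2,3,4].map (fun c => ((r:Int), (c:Int)))) from by decide]
  simp [List.foldl_cons, List.foldl_nil]

lemma pvProj_bound (house : List (List String)) (t : String) :
    ∀ x ∈ pvProj house t pvPairs, 0 ≤ x ∧ x < 3 := by
  intro x hx
  simp only [pvProj, List.mem_map, List.mem_filter] at hx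
  obtain ⟨p, ⟨hp, _⟩, rfl⟩ := hx
  exact pvPairs_bound p hp

lemma foldA_eq (house : List (List String)) (ps : List (Int × Int)) (lR lY : List Int) :
    ps.foldl (fun st p => aStep house st p.1 p.2) (PySem.Dict.mk [("R", lR), ("Y", lY)])
    = PySem.Dict.mk [("R", lR ++ pvProj house "R" ps), ("Y", lY ++ pvProj house "Y" ps)] := by
  induction ps generalizing lR lY with
  | nil => simp [pvProj]
  | cons q ps ih =>
    rw [List.foldl_cons]
    by_cases hR : cellAt house q.1 q.2 = "R"
    · rw [show aStep house (PySem.Dict.mk [("R", lR), ("Y", lY)]) q.1 q.2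
            = PySem.Dict.mk [("R", lR ++ [ringDist q.1 q.2]), ("Y", lY)] from by
          simp [aStep, hR, PySem.Dict.contains, PySem.Dict.modify, PySem.Dict.insert,
            PySem.Dict.getD, PySem.Dict.get?], ih]
      simp [pvProj, hR]
    · by_cases hY : cellAt house q.1 q.2 = "Y"
      · rw [show aStep house (PySem.Dict.mk [("R", lR), ("Y", lY)]) q.1 q.2
              = PySem.Dict.mk [("R", lR), ("Y", lY ++ [ringDist q.1 q.2])] from by
            simp [aStep, hY, PySem.Dict.contains, PySem.Dict.modify, PySem.Dict.insert,
              PySem.Dict.getD, PySem.Dict.get?], ih]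
        simp [pvProj, hY]
      · rw [show aStep house (PySem.Dict.mk [("R", lR), ("Y", lY)]) q.1 q.2
              = PySem.Dict.mk [("R", lR), ("Y", lY)] from by
            have hc : (PySem.Dict.mk [("R", lR), ("Y", lY)]).contains (cellAt house q.1 q.2) = false := by
              simp [PySem.Dict.contains]
              exact ⟨fun h => hR h.symm, fun h => hY h.symm⟩
            simp [aStep, hc], ih]
        simp [pvProj, hR, hY]

-- B's ring counts are exactly the multiplicities of each distance in A's lists
lemma ringCount_eq (house : List (List String)) (t : String) (d : Int)
    (hd : d = 0 ∨ d = 1 ∨ d = 2) :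
    ringCount house t d = ((pvProj house t pvPairs).count d : Int) := by
  have hperm : (ringCells d).Perm (pvPairs.filter (fun p => ringDist p.1 p.2 == d)) := by
    rcases hd with rfl | rfl | rfl <;> decide
  rw [ringCount, PySem.List.foldl_ite_add_one]
  have hcnt : (ringCells d).countP (fun p => decide (cellAt house p.1 p.2 = t))
      = pvPairs.countP (fun p => decide (cellAt house p.1 p.2 = t) && (ringDist p.1 p.2 == d)) := by
    rw [hperm.countP_eq, List.countP_filter]
  rw [hcnt]
  have : (pvProj house t pvPairs).count d
      = pvPairs.countP (fun p => decide (cellAt house p.1 p.2 = t) && (ringDist p.1 p.2 == d)) := by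
    rw [pvProj, List.count_eq_countP, List.countP_map, List.countP_filter]
    apply List.countP_congr
    intro p _
    simp [Function.comp, Bool.and_comm]
  rw [this]
  ring

-- the nearest occupied ring of a distance list
def nrL (L : List Int) : Int := nr3 (L.count 0) (L.count 1) (L.count 2)

lemma count_ne_of_mem (L : List Int) (x : Int) (hx : x ∈ L) : (L.count x : Int) ≠ 0 := by
  have := List.count_pos_iff.mpr hx
  omega

lemma nrL_mem (L : List Int) : nrL L = 0 ∨ nrL L = 1 ∨ nrL L = 2 ∨ nrL L = 3 := by
  rw [nrL, nr3]; split_ifs <;> simp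

lemma nrL_eq_three_iff (L : List Int) (h : ∀ x ∈ L, 0 ≤ x ∧ x < 3) : nrL L = 3 ↔ L = [] := by
  constructor
  · intro h3
    rw [nrL, nr3] at h3
    split_ifs at h3 with g0 g1 g2
    · omega
    · omega
    · omega
    · cases L with
      | nil => rfl
      | cons x t =>
        exfalso
        have hx := h x (by simp)
        have hm : x ∈ x :: t := by simp
        have hx3 : x = 0 ∨ x = 1 ∨ x = 2 := by omega
        rcases hx3 with rfl | rfl | rfl
        · exact g0 (count_ne_of_mem _ _ hm)
        · exact g1 (count_ne_of_mem _ _ hm)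
        · exact g2 (count_ne_of_mem _ _ hm)
  · intro he; subst he; simp [nrL, nr3]

lemma nrL_mem_self (L : List Int) (hne : L ≠ []) (h : ∀ x ∈ L, 0 ≤ x ∧ x < 3) : nrL L ∈ L := by
  rw [nrL, nr3]
  split_ifs with g0 g1 g2
  · exact List.count_pos_iff.mp (Nat.pos_of_ne_zero (by exact_mod_cast g0))
  · exact List.count_pos_iff.mp (Nat.pos_of_ne_zero (by exact_mod_cast g1))
  · exact List.count_pos_iff.mp (Nat.pos_of_ne_zero (by exact_mod_cast g2))
  · exfalso
    have h3 : nrL L = 3 := by rw [nrL, nr3]; simp [g0, g1, g2]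
    exact hne ((nrL_eq_three_iff L h).mp h3)

lemma nrL_le (L : List Int) (x : Int) (hx : x ∈ L) (h : ∀ y ∈ L, 0 ≤ y ∧ y < 3) : nrL L ≤ x := by
  have hb := h x hx
  rw [nrL, nr3]
  split_ifs with g0 g1 g2
  · omega
  · have h0 : x ≠ 0 := fun e => g0 (by subst e; exact count_ne_of_mem L _ hx)
    omega
  · have h0 : x ≠ 0 := fun e => g0 (by subst e; exact count_ne_of_mem L _ hx)
    have h1 : x ≠ 1 := fun e => g1 (by subst e; exact count_ne_of_mem L _ hx)
    omega
  · exfalso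
    have h0 : x ≠ 0 := fun e => g0 (by subst e; exact count_ne_of_mem L _ hx)
    have h1 : x ≠ 1 := fun e => g1 (by subst e; exact count_ne_of_mem L _ hx)
    have h2 : x ≠ 2 := fun e => g2 (by subst e; exact count_ne_of_mem L _ hx)
    omega

lemma min?_eq_nrL (L : List Int) (h : ∀ x ∈ L, 0 ≤ x ∧ x < 3) (hne : L ≠ []) :
    PySem.List.min? L (fun x => x) = some (nrL L) := by
  cases hm : PySem.List.min? L (fun x => x) with
  | none => exact absurd ((PySem.List.min?_eq_none_iff L (fun x => x)).mp hm) hne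
  | some m =>
    have hmem : m ∈ L := PySem.List.min?_mem hm
    have hmin := PySem.List.min?_isMin hm
    have h1 : nrL L ≤ m := nrL_le L m hmem h
    have h2 : m ≤ nrL L := hmin _ (nrL_mem_self L hne h)
    have : m = nrL L := le_antisymm h2 h1
    rw [this]

lemma countP_split (L : List Int) (h : ∀ x ∈ L, 0 ≤ x ∧ x < 3) :
    L.countP (fun d => decide (d < 1)) = L.count 0 ∧
    L.countP (fun d => decide (d < 2)) = L.count 0 + L.count 1 ∧
    L.countP (fun d => decide (d < 3)) = L.count 0 + L.count 1 + L.count 2 ∧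
    L.length = L.count 0 + L.count 1 + L.count 2 := by
  induction L with
  | nil => simp
  | cons x t ih =>
    have hx := h x (by simp)
    have ht := ih (fun y hy => h y (List.mem_cons_of_mem _ hy))
    have hx3 : x = 0 ∨ x = 1 ∨ x = 2 := by omega
    rcases hx3 with rfl | rfl | rfl <;>
      simp only [List.countP_cons, List.count_cons, List.length_cons,
        ht.1, ht.2.1, ht.2.2.1, ht.2.2.2] <;>
      simp <;> omega

lemma foldl_one (l : List Int) (a : Int) :
    l.foldl (fun acc (_ : Int) => acc + 1) a = a + l.length := by
  induction l generalizing a with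
  | nil => simp
  | cons x t ih => simp [ih]; omega

-- A's tail code equals the closed scoring form on the six ring counts
-- A's points loop: count-below-m for oppMin = some m, full length for "inf" (none)
lemma foldl_points (L : List Int) (o : Option Int) :
    L.foldl (fun acc d =>
      if (match o with | none => true | some m => decide (d < m)) then acc + 1 else acc) (0 : Int)
    = (match o with
       | none => (L.length : Int)
       | some m => (L.countP (fun d => decide (d < m)) : Int)) := by
  cases o with
  | none => simp [foldl_one]
  | some m => simp [PySem.List.foldl_ite_add_one]

lemma finish_eq (LR LY : List Int) (hR : ∀ x ∈ LR, 0 ≤ x ∧ x < 3)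
    (hY : ∀ x ∈ LY, 0 ≤ x ∧ x < 3) :
    aFinish (PySem.Dict.mk [("R", LR), ("Y", LY)]) =
      bucketOut (LR.count 0) (LR.count 1) (LR.count 2) (LY.count 0) (LY.count 1) (LY.count 2) := by
  have gR : (PySem.Dict.mk [("R", LR), ("Y", LY)]).getD "R" [] = LR := by
    simp [PySem.Dict.getD, PySem.Dict.get?]
  have gY : (PySem.Dict.mk [("R", LR), ("Y", LY)]).getD "Y" [] = LY := by
    simp [PySem.Dict.getD, PySem.Dict.get?]
  obtain ⟨cR1, cR2, cR3, cR4⟩ := countP_split LR hR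
  obtain ⟨cY1, cY2, cY3, cY4⟩ := countP_split LY hY
  rw [aFinish, bucketOut]
  simp only [gR, gY]
  rw [show nr3 (LR.count 0) (LR.count 1) (LR.count 2) = nrL LR from rfl,
      show nr3 (LY.count 0) (LY.count 1) (LY.count 2) = nrL LY from rfl]
  by_cases hRe : LR = []
  · by_cases hYe : LY = []
    · subst hRe; subst hYe; simp [nrL, nr3]
    · have h3 : nrL LY ≠ 3 := fun e => hYe ((nrL_eq_three_iff LY hY).mp e)
      have hcases := nrL_mem LY
      have hR3 : nrL LR = 3 := (nrL_eq_three_iff LR hR).mpr hRe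
      subst hRe
      have hne : ¬((nrL ([] : List Int)) = nrL LY) := by rw [hR3]; omega
      have hnlt : ¬(nrL ([] : List Int) < nrL LY) := by rw [hR3]; omega
      rw [if_neg (by simp [hYe]), if_neg hne, if_neg hnlt]
      simp only [hR3, if_neg (show (3:Int) ≠ 1 by decide), if_neg (show (3:Int) ≠ 2 by decide),
        if_true]
      rw [foldl_points]
      simp only [show (if "Y" = "R" then "Y" else "R") = "R" from by decide, gR, gY,
        show (PySem.List.min? ([] : List Int) (fun x => x)) = none from rfl]
      congr 1
      rw [cY4]
      push_cast
      ring
  · by_cases hYe : LY = []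
    · have h3 : nrL LR ≠ 3 := fun e => hRe ((nrL_eq_three_iff LR hR).mp e)
      have hcases := nrL_mem LR
      have hY3 : nrL LY = 3 := (nrL_eq_three_iff LY hY).mpr hYe
      subst hYe
      have hne : ¬(nrL LR = nrL ([] : List Int)) := by rw [hY3]; omega
      have hlt : nrL LR < nrL ([] : List Int) := by rw [hY3]; omega
      rw [if_neg (by simp [hRe]), if_neg hne, if_pos hlt]
      simp only [hY3, if_neg (show (3:Int) ≠ 1 by decide), if_neg (show (3:Int) ≠ 2 by decide),
        if_neg hRe, if_true]
      rw [foldl_points]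
      simp only [if_true, gR, gY,
        show (PySem.List.min? ([] : List Int) (fun x => x)) = none from rfl]
      congr 1
      rw [cR4]
      push_cast
      ring
    · rw [if_neg (by simp [hRe]), if_neg hRe, if_neg hYe,
        min?_eq_nrL LR hR hRe, min?_eq_nrL LY hY hYe]
      simp only [Option.getD_some]
      by_cases heq : nrL LR = nrL LY
      · simp [heq]
      · have hRc := nrL_mem LR
        have hYc := nrL_mem LY
        have hR3 : nrL LR ≠ 3 := fun e => hRe ((nrL_eq_three_iff LR hR).mp e)
        have hY3 : nrL LY ≠ 3 := fun e => hYe ((nrL_eq_three_iff LY hY).mp e)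
        by_cases hlt : nrL LR < nrL LY
        · rw [if_neg heq, if_neg heq, if_pos hlt, if_pos hlt]
          have hY12 : nrL LY = 1 ∨ nrL LY = 2 := by omega
          simp only []
          rw [foldl_points]
          simp only [if_true, gR, gY,
            min?_eq_nrL LY hY hYe]
          rcases hY12 with e | e <;> simp only [e] <;> norm_num <;> congr 1
          · rw [cR1]
          · rw [show (fun d : Int => decide (d ≤ 1)) = (fun d : Int => decide (d < 2)) from
              funext fun d => decide_eq_decide.mpr (by omega), cR2]
            push_cast; ring
        · have hgt : nrL LY < nrL LR := by omega
          rw [if_neg heq, if_neg heq, if_neg hlt, if_neg hlt]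
          have hR12 : nrL LR = 1 ∨ nrL LR = 2 := by omega
          simp only []
          rw [foldl_points]
          simp only [show (if "Y" = "R" then "Y" else "R") = "R" from by decide, gR, gY,
            min?_eq_nrL LR hR hRe]
          rcases hR12 with e | e <;> simp only [e] <;> norm_num <;> congr 1
          · rw [cY1]
          · rw [show (fun d : Int => decide (d ≤ 1)) = (fun d : Int => decide (d < 2)) from
              funext fun d => decide_eq_decide.mpr (by omega), cY2]
            push_cast; ring

-- B's outward scan equals the closed scoring form on its six ring counts
set_option maxHeartbeats 1600000 in
lemma scan_eq (house : List (List String)) (a0 a1 a2 b0 b1 b2 : Int)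
    (e1 : ringCount house "R" 0 = a0) (e2 : ringCount house "R" 1 = a1)
    (e3 : ringCount house "R" 2 = a2) (e4 : ringCount house "Y" 0 = b0)
    (e5 : ringCount house "Y" 1 = b1) (e6 : ringCount house "Y" 2 = b2) :
    score_curling_alt house = bucketOut a0 a1 a2 b0 b1 b2 := by
  rw [score_curling_alt,
    show PySem.List.pyRange 0 3 1 = [0, 1, 2] from by decide]
  simp only [List.foldl_cons, List.foldl_nil]
  rw [bucketOut, nr3, nr3]
  by_cases h1 : a0 = 0 <;> by_cases h2 : b0 = 0 <;> by_cases h3 : a1 = 0 <;>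
    by_cases h4 : b1 = 0 <;> by_cases h5 : a2 = 0 <;> by_cases h6 : b2 = 0 <;>
    simp [scanStep, scanFinish, e1, e2, e3, e4, e5, e6, h1, h2, h3, h4, h5, h6]

theorem main_eq (house : List (List String)) : score_curling house = score_curling_alt house := by
  rw [score_curling, nested_eq_flat (aStep house),
    show PySem.Dict.ofList [("R", ([] : List Int)), ("Y", ([] : List Int))]
        = PySem.Dict.mk [("R", []), ("Y", [])] from rfl,
    foldA_eq]
  simp only [List.nil_append]
  rw [finish_eq (pvProj house "R" pvPairs) (pvProj house "Y" pvPairs)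
    (pvProj_bound house "R") (pvProj_bound house "Y")]
  exact (scan_eq house _ _ _ _ _ _
    (ringCount_eq house "R" 0 (by omega)) (ringCount_eq house "R" 1 (by omega))
    (ringCount_eq house "R" 2 (by omega)) (ringCount_eq house "Y" 0 (by omega))
    (ringCount_eq house "Y" 1 (by omega)) (ringCount_eq house "Y" 2 (by omega))).symm

-- ===== VERDICT =====
theorem score_curling_spec : Claim_equal_score_curling := by
  intro house _ _
  unfold Spec_score_curling
  exact main_eq house
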